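-- pv_equiv track=rewrite | github.com/z3y50n/advent_of_code | 2020/11/day11.py | calc_next2
-- ===== SOURCE A (Python) =====
-- def calc_next2(x, y, seats):
--     status = "#"
--     if seats[x][y] == "L":
--         for i in range(-1,2):
--             for j in range(-1,2):
--                 new_x = x + i
--                 new_y = y + j
--                 if new_x == x and new_y == y: continue
--                 while new_x>=0 and new_y>=0 and new_x<len(seats) and new_y<len(seats[0]):
--                     if seats[new_x][new_y] == "#":
--                         status = "L"
--                         break
--                     elif seats[new_x][new_y] == "L": break
--                     new_x += i
--                     new_y += j
--                 if status == "L": break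
--             if status == "L": break
--     elif seats[x][y] == "#":
--         cnt = 0
--         for i in range(-1,2):
--             for j in range(-1,2):
--                 new_x = x + i
--                 new_y = y + j
--                 if new_x == x and new_y == y: continue
--                 while new_x>=0 and new_y>=0 and new_x<len(seats) and new_y<len(seats[0]):
--                     if seats[new_x][new_y] == "#":
--                         cnt += 1
--                         break
--                     elif seats[new_x][new_y] == "L": break
--                     new_x += i
--                     new_y += j
--         if cnt > 4: status = "L"
--     else:
--         status =  "."
--     return status
-- ===== SOURCE B (Python) =====
-- def _clear(px, py, seats):
--     return (0 <= px < len(seats) and 0 <= py < len(seats[0])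
--             and seats[px][py] not in ("#", "L"))
--
--
-- def _visible(x, y, i, j, seats):
--     dx, dy = i - x, j - y
--     if dx == 0 and dy == 0:
--         return False
--     if dx != 0 and dy != 0 and abs(dx) != abs(dy):
--         return False
--     sx = (dx > 0) - (dx < 0)
--     sy = (dy > 0) - (dy < 0)
--     return all(_clear(x + k * sx, y + k * sy, seats)
--                for k in range(1, max(abs(dx), abs(dy))))
--
--
-- def calc_next2(x, y, seats):
--     cell = seats[x][y]
--     if cell != "L" and cell != "#":
--         return "."
--     cnt = sum(1 for i, row in enumerate(seats) for j, c in enumerate(row)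
--               if c == "#" and _visible(x, y, i, j, seats))
--     if cell == "L":
--         return "L" if cnt > 0 else "#"
--     return "L" if cnt > 4 else "#"
-- ===== Notes on version B (the rewrite author's own statement) =====
-- stated objective: alternative
-- what changed: A walks 8 rays outward from (x,y) in two duplicated nested loop blocks (early-exiting for an 'L' cell, counting for a '#'); B never ray-casts: it scans every grid cell once and counts occupied cells satisfying a line-of-sight predicate (aligned with (x,y) and all strictly-between cells in bounds and floor), then decides with cnt>0 resp. cnt>4.
-- outside the precondition, e.g. on calc_next2(0, 0, [['L'], ['L', '#']]): A returns '#', B returns 'L'; on calc_next2(0, 2, [['#', '.', 'L'], ['.'], ['#']]): A returns 'L', B raises IndexError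
import Mathlib
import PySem

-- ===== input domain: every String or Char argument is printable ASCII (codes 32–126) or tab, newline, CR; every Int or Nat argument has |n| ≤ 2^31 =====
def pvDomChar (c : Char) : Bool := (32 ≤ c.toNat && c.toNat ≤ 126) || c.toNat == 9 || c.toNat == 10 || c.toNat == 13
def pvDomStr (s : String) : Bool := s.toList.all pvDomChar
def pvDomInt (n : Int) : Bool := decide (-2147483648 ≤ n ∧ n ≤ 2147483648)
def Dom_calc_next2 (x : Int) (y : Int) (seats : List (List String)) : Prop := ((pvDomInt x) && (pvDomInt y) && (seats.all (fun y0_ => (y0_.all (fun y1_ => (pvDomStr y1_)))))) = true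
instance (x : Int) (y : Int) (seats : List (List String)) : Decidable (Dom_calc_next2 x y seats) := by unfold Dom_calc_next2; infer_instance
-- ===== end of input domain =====

-- B replaces A's per-branch 8-direction ray walks by a scan of ALL grid cells with a
-- line-of-sight predicate (count occupied cells visible from (x,y)), then one decision
-- on the current cell (objective: alternative decomposition, not claimed faster).


-- ===== PORT A =====
-- len(seats[0]) as both Pythons evaluate it (defined only when seats ≠ [], which Pre_ ensures)
def pyWidth (seats : List (List String)) : Nat := (seats.headD []).length

-- A's inner `while` walk: steps by (i,j) from (nx,ny) until out of bounds or a non-floor cell;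
-- true iff the first seat hit is "#".  The while loop runs at most max(rows,cols)+1 times, so
-- fuel rows+width+1 never runs out on the directions A uses ((i,j) ≠ (0,0)); the `none` branch
-- (a ragged grid: Python IndexError) is excluded by Pre_calc_next2.
def rayA (seats : List (List String)) (i j : Int) : Nat → Int → Int → Bool
  | 0, _, _ => false
  | fuel + 1, nx, ny =>
    if nx ≥ 0 ∧ ny ≥ 0 ∧ nx < (seats.length : Int) ∧ ny < (pyWidth seats : Int) then
      match (PySem.List.pyGet? seats nx).bind (fun r => PySem.List.pyGet? r ny) with
      | some c =>
        if c == "#" then true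
        else if c == "L" then false
        else rayA seats i j fuel (nx + i) (ny + j)
      | none => false
    else false

def calc_next2 (x : Int) (y : Int) (seats : List (List String)) : String :=
  let fuel := seats.length + pyWidth seats + 1
  match (PySem.List.pyGet? seats x).bind (fun r => PySem.List.pyGet? r y) with
  | none => ""   -- seats[x][y] raises IndexError in Python: outside Pre_calc_next2
  | some cell =>
    if cell == "L" then
      (PySem.List.pyRange (-1) 2 1).foldl (fun st i =>
        if st == "L" then st else
        (PySem.List.pyRange (-1) 2 1).foldl (fun st j =>
          if st == "L" then st else
          if x + i == x && y + j == y then st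
          else if rayA seats i j fuel (x + i) (y + j) then "L" else st) st) "#"
    else if cell == "#" then
      let cnt : Int := (PySem.List.pyRange (-1) 2 1).foldl (fun cnt i =>
        (PySem.List.pyRange (-1) 2 1).foldl (fun cnt j =>
          if x + i == x && y + j == y then cnt
          else if rayA seats i j fuel (x + i) (y + j) then cnt + 1 else cnt) cnt) 0
      if cnt > 4 then "L" else "#"
    else "."

-- ===== PORT B =====
-- Source B's `(dx > 0) - (dx < 0)`
def dsign (n : Int) : Int := (if n > 0 then 1 else 0) - (if n < 0 then 1 else 0)

-- Source B's `_clear`: in bounds and not a seat.  The `none` branch (a ragged grid row shorter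
-- than row 0: Python IndexError) is outside Pre_calc_next2.
def clearB (px py : Int) (seats : List (List String)) : Bool :=
  decide (0 ≤ px) && decide (px < (seats.length : Int)) &&
  decide (0 ≤ py) && decide (py < (pyWidth seats : Int)) &&
  (match (PySem.List.pyGet? seats px).bind (fun r => PySem.List.pyGet? r py) with
   | some c => !(c == "#") && !(c == "L")
   | none => false)

-- Source B's `_visible`: (i,j) is aligned with (x,y) and every strictly-between cell is clear.
def visibleB (x y i j : Int) (seats : List (List String)) : Bool :=
  let dx := i - x
  let dy := j - y
  if dx == 0 && dy == 0 then false
  else if dx != 0 && dy != 0 && |dx| != |dy| then false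
  else
    (PySem.List.pyRange 1 (max |dx| |dy|) 1).all
      (fun k => clearB (x + k * dsign dx) (y + k * dsign dy) seats)

def calc_next2_alt (x : Int) (y : Int) (seats : List (List String)) : String :=
  match (PySem.List.pyGet? seats x).bind (fun r => PySem.List.pyGet? r y) with
  | none => ""   -- seats[x][y] raises IndexError in Python: outside Pre_calc_next2
  | some cell =>
    if cell != "L" && cell != "#" then "."
    else
      let cnt : Int := (PySem.List.enumerate seats).foldl (fun cnt p =>
          (PySem.List.enumerate p.2).foldl (fun cnt q =>
            if q.2 == "#" && visibleB x y p.1 q.1 seats then cnt + 1 else cnt) cnt) 0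
      if cell == "L" then (if cnt > 0 then "L" else "#")
      else (if cnt > 4 then "L" else "#")

-- ===== PRECONDITION & SPEC =====
-- Pre_ excludes inputs on which Python raises IndexError: those where seats[x][y] itself is out
-- of range, and ragged grids whose centre cell is a seat ("L"/"#"), on which either program's
-- scan (its width taken from row 0) can step onto a missing cell; on some such ragged grids one
-- or both programs happen to return before reaching the short row — those are excluded with the
-- raising ones (the two scan orders make the corner an accident of the implementation).
def Pre_calc_next2 (x : Int) (y : Int) (seats : List (List String)) : Prop :=
  (PySem.List.pyGet? seats x).bind (fun r => PySem.List.pyGet? r y) ≠ none ∧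
  (((PySem.List.pyGet? seats x).bind (fun r => PySem.List.pyGet? r y) = some "L" ∨
    (PySem.List.pyGet? seats x).bind (fun r => PySem.List.pyGet? r y) = some "#") →
    ∀ row ∈ seats, row.length = pyWidth seats)
instance (x : Int) (y : Int) (seats : List (List String)) : Decidable (Pre_calc_next2 x y seats) := by unfold Pre_calc_next2; infer_instance
def pvWitness_calc_next2 : Int × Int × List (List String) :=
  (1, 1, [["L", ".", "#"], [".", "#", "."], ["#", ".", "L"]])
def Spec_calc_next2 (x : Int) (y : Int) (seats : List (List String)) (out : String) : Prop := out = calc_next2_alt x y seats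
instance (x : Int) (y : Int) (seats : List (List String)) (out : String) : Decidable (Spec_calc_next2 x y seats out) := by unfold Spec_calc_next2; infer_instance

-- ===== CLAIM (what is proved, stated in full; the proofs are below) =====
def Claim_equal_calc_next2 : Prop := ∀ (x : Int) (y : Int) (seats : List (List String)), Dom_calc_next2 x y seats → Pre_calc_next2 x y seats → Spec_calc_next2 x y seats (calc_next2 x y seats)

-- ===== LEMMAS AND PROOFS =====

-- The eight direction vectors (proof-side name for B's sign pairs / A's loop pairs).
def D8 : List (Int × Int) := [(-1,-1),(-1,0),(-1,1),(0,-1),(0,1),(1,-1),(1,0),(1,1)]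

-- "the cell at (px,py) is in bounds and holds '#'"
def hitHash (seats : List (List String)) (px py : Int) : Bool :=
  decide (0 ≤ px) && decide (px < (seats.length : Int)) &&
  decide (0 ≤ py) && decide (py < (pyWidth seats : Int)) &&
  (((PySem.List.pyGet? seats px).bind (fun r => PySem.List.pyGet? r py)) == some "#")

-- the flattened enumerated grid B's double loop runs over
def cellsOf (seats : List (List String)) : List (Int × Int × String) :=
  (PySem.List.enumerate seats).flatMap
    (fun p => (PySem.List.enumerate p.2).map (fun q => (p.1, q.1, q.2)))

def bigPred (x y : Int) (seats : List (List String)) (t : Int × Int × String) : Bool :=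
  t.2.2 == "#" && visibleB x y t.1 t.2.1 seats

def dirOf (x y : Int) (t : Int × Int × String) : Int × Int :=
  (dsign (t.1 - x), dsign (t.2.1 - y))

-- On a rectangular grid an in-bounds lookup succeeds.
theorem cellAt_eq (seats : List (List String))
    (hrect : ∀ row ∈ seats, row.length = pyWidth seats) (px py : Int)
    (h1 : 0 ≤ px) (h2 : px < (seats.length : Int)) (h3 : 0 ≤ py) (h4 : py < (pyWidth seats : Int)) :
    ∃ (hp : px.toNat < seats.length) (hq : py.toNat < (seats[px.toNat]).length),
      (PySem.List.pyGet? seats px).bind (fun r => PySem.List.pyGet? r py)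
        = some (seats[px.toNat][py.toNat]) := by
  have hp : px.toNat < seats.length := by omega
  have hlen := hrect _ (seats.getElem_mem hp)
  have hq : py.toNat < (seats[px.toNat]).length := by omega
  refine ⟨hp, hq, ?_⟩
  rw [PySem.List.pyGet?_of_nonneg _ h1, List.getElem?_eq_getElem hp]
  simp [PySem.List.pyGet?_of_nonneg _ h3, List.getElem?_eq_getElem hq]

theorem rayA_iff (seats : List (List String)) (sx sy : Int) (f : Nat) (px py : Int)
    (hrect : ∀ row ∈ seats, row.length = pyWidth seats) :
    rayA seats sx sy f px py = true ↔
      ∃ k : Nat, k < f ∧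
        (∀ m : Nat, m < k → clearB (px + m * sx) (py + m * sy) seats = true) ∧
        hitHash seats (px + k * sx) (py + k * sy) = true := by
  induction f generalizing px py with
  | zero => simp [rayA]
  | succ f ih =>
    rw [rayA]
    by_cases hb : px ≥ 0 ∧ py ≥ 0 ∧ px < (seats.length : Int) ∧ py < (pyWidth seats : Int)
    · rw [if_pos hb]
      obtain ⟨hp, hq, hcell⟩ := cellAt_eq seats hrect px py hb.1 hb.2.2.1 hb.2.1 hb.2.2.2
      rw [hcell]
      simp only []
      by_cases hH : seats[px.toNat][py.toNat] = "#"
      · simp only [hH, BEq.rfl, if_true]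
        constructor
        · intro _
          refine ⟨0, by omega, by omega, ?_⟩
          simp only [Nat.cast_zero, zero_mul, add_zero, hitHash, hcell, hH]
          simp [hb.1, hb.2.1, hb.2.2.1, hb.2.2.2]
        · intro _; trivial
      · have eH : (seats[px.toNat][py.toNat] == "#") = false := by simp [hH]
        rw [eH]
        simp only [Bool.false_eq_true, if_false]
        by_cases hL : seats[px.toNat][py.toNat] = "L"
        · simp only [hL, BEq.rfl, if_true, Bool.false_eq_true, if_false]
          constructor
          · intro h; cases h
          · rintro ⟨k, hk, hcl, hhit⟩
            exfalso
            cases k with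
            | zero =>
              simp only [Nat.cast_zero, zero_mul, add_zero, hitHash, hcell] at hhit
              simp [hL] at hhit
            | succ n =>
              have h0 := hcl 0 (by omega)
              simp only [Nat.cast_zero, zero_mul, add_zero, clearB, hcell] at h0
              simp [hL] at h0
        · have eL : (seats[px.toNat][py.toNat] == "L") = false := by simp [hL]
          rw [eL]
          simp only [Bool.false_eq_true, if_false]
          rw [ih]
          constructor
          · rintro ⟨k, hk, hcl, hhit⟩
            refine ⟨k + 1, by omega, ?_, ?_⟩
            · intro m hm
              cases m with
              | zero =>
                simp only [Nat.cast_zero, zero_mul, add_zero, clearB, hcell]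
                simp [hb.1, hb.2.1, hb.2.2.1, hb.2.2.2, hH, hL]
              | succ n =>
                have := hcl n (by omega)
                convert this using 2 <;> push_cast <;> ring
            · convert hhit using 2 <;> push_cast <;> ring
          · rintro ⟨k, hk, hcl, hhit⟩
            cases k with
            | zero =>
              exfalso
              simp only [Nat.cast_zero, zero_mul, add_zero, hitHash, hcell] at hhit
              simp [hH] at hhit
            | succ n =>
              refine ⟨n, by omega, ?_, ?_⟩
              · intro m hm
                have := hcl (m + 1) (by omega)
                convert this using 2 <;> push_cast <;> ring
              · convert hhit using 2 <;> push_cast <;> ring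
    · rw [if_neg hb]
      constructor
      · intro h; cases h
      · rintro ⟨k, hk, hcl, hhit⟩
        exfalso
        cases k with
        | zero =>
          simp only [Nat.cast_zero, zero_mul, add_zero, hitHash] at hhit
          simp only [Bool.and_eq_true, decide_eq_true_eq] at hhit
          exact hb ⟨hhit.1.1.1.1, hhit.1.1.2, hhit.1.1.1.2, hhit.1.2⟩
        | succ n =>
          have h0 := hcl 0 (by omega)
          simp only [Nat.cast_zero, zero_mul, add_zero, clearB] at h0
          simp only [Bool.and_eq_true, decide_eq_true_eq] at h0
          exact hb ⟨h0.1.1.1.1, h0.1.1.2, h0.1.1.1.2, h0.1.2⟩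
theorem steps_bound (R W sx sy x y : Int)
    (hsx : sx = -1 ∨ sx = 0 ∨ sx = 1) (hsy : sy = -1 ∨ sy = 0 ∨ sy = 1)
    (hne : ¬(sx = 0 ∧ sy = 0)) (k : Int) (hk1 : 1 ≤ k)
    (h1 : 0 ≤ x + sx ∧ x + sx < R ∧ 0 ≤ y + sy ∧ y + sy < W)
    (hk : 0 ≤ x + k * sx ∧ x + k * sx < R ∧ 0 ≤ y + k * sy ∧ y + k * sy < W) :
    k ≤ R + W := by
  rcases hsx with h | h | h <;> rcases hsy with h' | h' | h' <;> subst h <;> subst h' <;>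
    simp only [mul_one, mul_neg_one, mul_zero, add_zero] at h1 hk <;> omega

-- sign decomposition of an aligned offset
theorem align_decomp (dx dy sx sy : Int)
    (h1 : ¬(dx = 0 ∧ dy = 0)) (h2 : dx = 0 ∨ dy = 0 ∨ |dx| = |dy|)
    (hdx : dsign dx = sx) (hdy : dsign dy = sy) :
    1 ≤ max |dx| |dy| ∧ dx = (max |dx| |dy|) * sx ∧ dy = (max |dx| |dy|) * sy := by
  unfold dsign at hdx hdy
  subst hdx; subst hdy
  rcases max_cases |dx| |dy| with ⟨hm, hm'⟩ | ⟨hm, hm'⟩ <;>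
  rcases abs_cases dx with ⟨ha, ha'⟩ | ⟨ha, ha'⟩ <;>
  rcases abs_cases dy with ⟨hb, hb'⟩ | ⟨hb, hb'⟩ <;>
  simp only [hm, ha, hb] at h2 hm' ⊢ <;> split_ifs <;> omega

theorem align_comp (K sx sy : Int) (hK : 1 ≤ K)
    (hsx : sx = -1 ∨ sx = 0 ∨ sx = 1) (hsy : sy = -1 ∨ sy = 0 ∨ sy = 1)
    (hne : ¬(sx = 0 ∧ sy = 0)) :
    dsign (K * sx) = sx ∧ dsign (K * sy) = sy ∧ max |K * sx| |K * sy| = K ∧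
      (K * sx = 0 ∨ K * sy = 0 ∨ |K * sx| = |K * sy|) ∧ ¬(K * sx = 0 ∧ K * sy = 0) := by
  rcases hsx with h | h | h <;> rcases hsy with h' | h' | h' <;> subst h <;> subst h' <;>
    simp_all [dsign, abs_of_pos, abs_of_nonneg, abs_of_neg] <;> omega


theorem visibleB_iff (x y i j : Int) (seats : List (List String)) :
    visibleB x y i j seats = true ↔
      ¬(i - x = 0 ∧ j - y = 0) ∧ (i - x = 0 ∨ j - y = 0 ∨ |i - x| = |j - y|) ∧
      ∀ k : Int, 1 ≤ k → k < max |i - x| |j - y| →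
        clearB (x + k * dsign (i - x)) (y + k * dsign (j - y)) seats = true := by
  simp only [visibleB]
  by_cases h1 : i - x = 0 ∧ j - y = 0
  · simp [h1.1, h1.2]
  · have e1 : (i - x == 0 && j - y == 0) = false := by
      rcases not_and_or.mp h1 with h | h <;> simp [h]
    rw [e1]
    by_cases h2 : i - x = 0 ∨ j - y = 0 ∨ |i - x| = |j - y|
    · have e2 : (i - x != 0 && j - y != 0 && |i - x| != |j - y|) = false := by
        rcases h2 with h | h | h <;> simp [h]
      rw [e2]
      simp only [Bool.false_eq_true, if_false, List.all_eq_true, PySem.List.mem_pyRange_one]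
      constructor
      · intro h; exact ⟨h1, h2, fun k hk1 hk2 => h k ⟨hk1, hk2⟩⟩
      · rintro ⟨-, -, h⟩ k ⟨hk1, hk2⟩; exact h k hk1 hk2
    · have e2 : (i - x != 0 && j - y != 0 && |i - x| != |j - y|) = true := by
        push Not at h2
        simp [h2.1, h2.2.1, h2.2.2]
      rw [e2]
      constructor
      · intro h; simp at h
      · rintro ⟨-, hal, -⟩; exact absurd hal h2

theorem mem_cellsOf (seats : List (List String)) (t : Int × Int × String) :
    t ∈ cellsOf seats ↔
      ∃ (k : Nat) (hk : k < seats.length) (m : Nat) (hm : m < (seats[k]).length),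
        t = ((k : Int), (m : Int), seats[k][m]) := by
  simp only [cellsOf, List.mem_flatMap, List.mem_map, PySem.List.mem_enumerate_iff]
  constructor
  · rintro ⟨p, ⟨k, hk, rfl⟩, q, ⟨m, hm, rfl⟩, rfl⟩
    exact ⟨k, hk, m, hm, by simp⟩
  · rintro ⟨k, hk, m, hm, rfl⟩
    exact ⟨((0:Int) + (k:Int), seats[k]), ⟨k, hk, rfl⟩,
      ((0:Int) + (m:Int), seats[k][m]), ⟨m, hm, rfl⟩, by simp⟩

theorem nodup_cellsOf (seats : List (List String)) : (cellsOf seats).Nodup := by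
  unfold cellsOf
  rw [List.nodup_flatMap]
  constructor
  · intro p hp
    refine List.Nodup.map ?_ ?_
    · intro a b hab
      simpa [Prod.ext_iff] using hab
    · exact ((PySem.List.pairwise_lt_enumerate _ _).imp
        (fun {a b} h => by intro he; subst he; exact lt_irrefl _ h))
  · refine ((PySem.List.pairwise_lt_enumerate _ _).imp ?_)
    intro p q hlt
    intro t ht ht'
    simp only [List.mem_map] at ht ht'
    obtain ⟨a, -, rfl⟩ := ht
    obtain ⟨b, -, hb⟩ := ht'
    have hfst := congrArg Prod.fst hb
    simp only at hfst
    omega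

theorem countP_eq_one_of_unique {α : Type} (l : List α) (q : α → Bool) (a : α)
    (hnd : l.Nodup) (ha : a ∈ l) (hqa : q a = true)
    (huniq : ∀ b ∈ l, q b = true → b = a) : l.countP q = 1 := by
  induction l with
  | nil => cases ha
  | cons c l ih =>
    rw [List.countP_cons]
    rcases List.mem_cons.mp ha with rfl | hmem
    · have h0 : l.countP q = 0 := by
        rw [List.countP_eq_zero]
        intro b hb hqb
        have hba := huniq b (List.mem_cons_of_mem _ hb) hqb
        subst hba
        exact (List.nodup_cons.mp hnd).1 hb
      simp [hqa, h0]
    · have hc : q c = false := by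
        by_contra h
        have hqc : q c = true := by simpa using h
        have := huniq c (List.mem_cons_self) hqc
        subst this
        exact (List.nodup_cons.mp hnd).1 hmem
      rw [hc]
      simp only [Bool.false_eq_true, if_false, add_zero]
      exact ih (List.nodup_cons.mp hnd).2 hmem
        (fun b hb hqb => huniq b (List.mem_cons_of_mem _ hb) hqb)
theorem countP_partition (l : List (Int × Int × String)) (p : Int × Int × String → Bool)
    (dir : Int × Int × String → Int × Int)
    (h : ∀ t ∈ l, p t = true → dir t ∈ D8) :
    l.countP p = (D8.map (fun d => l.countP (fun t => p t && (dir t == d)))).sum := by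
  induction l with
  | nil => simp [D8]
  | cons t l ih =>
    have ih' := ih (fun t' ht' hp' => h t' (List.mem_cons_of_mem _ ht') hp')
    cases hp : p t
    · simp only [List.countP_cons, hp, Bool.false_and, Bool.false_eq_true, if_false, add_zero,
        D8, List.map, List.sum_cons, List.sum_nil] at ih' ⊢
      omega
    · have hd : dir t ∈ D8 := h t List.mem_cons_self hp
      simp only [D8, List.mem_cons, List.not_mem_nil, or_false] at hd
      simp only [List.countP_cons, hp, Bool.true_and, D8, List.map, List.sum_cons,
        List.sum_nil] at ih' ⊢
      rcases hd with hd|hd|hd|hd|hd|hd|hd|hd <;> rw [hd] <;> simp <;> omega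

theorem bounds_of_clear (seats : List (List String)) (px py : Int)
    (h : clearB px py seats = true) :
    0 ≤ px ∧ px < (seats.length : Int) ∧ 0 ≤ py ∧ py < (pyWidth seats : Int) := by
  simp only [clearB, Bool.and_eq_true, decide_eq_true_eq] at h
  exact ⟨h.1.1.1.1, h.1.1.1.2, h.1.1.2, h.1.2⟩

theorem bounds_of_hit (seats : List (List String)) (px py : Int)
    (h : hitHash seats px py = true) :
    0 ≤ px ∧ px < (seats.length : Int) ∧ 0 ≤ py ∧ py < (pyWidth seats : Int) := by
  simp only [hitHash, Bool.and_eq_true, decide_eq_true_eq] at h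
  exact ⟨h.1.1.1.1, h.1.1.1.2, h.1.1.2, h.1.2⟩

theorem clear_not_hit (seats : List (List String)) (px py : Int)
    (h1 : clearB px py seats = true) (h2 : hitHash seats px py = true) : False := by
  simp only [clearB, hitHash, Bool.and_eq_true, beq_iff_eq] at h1 h2
  rw [h2.2] at h1
  simp at h1

-- the per-direction grid count is exactly A's ray test
theorem dir_count (x y : Int) (seats : List (List String))
    (hrect : ∀ row ∈ seats, row.length = pyWidth seats) (sx sy : Int)
    (hsx : sx = -1 ∨ sx = 0 ∨ sx = 1) (hsy : sy = -1 ∨ sy = 0 ∨ sy = 1)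
    (hne : ¬(sx = 0 ∧ sy = 0)) :
    (cellsOf seats).countP (fun t => bigPred x y seats t && (dirOf x y t == (sx, sy)))
      = if rayA seats sx sy (seats.length + pyWidth seats + 1) (x + sx) (y + sy) then 1 else 0 := by
  -- any counted cell is the K-th step of the (sx,sy)-ray with a clear strict prefix
  have hW : ∀ t ∈ cellsOf seats, (bigPred x y seats t && (dirOf x y t == (sx,sy))) = true →
      ∃ K : Int, 1 ≤ K ∧ t.1 = x + K * sx ∧ t.2.1 = y + K * sy ∧ t.2.2 = "#" ∧
        hitHash seats t.1 t.2.1 = true ∧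
        (∀ k : Int, 1 ≤ k → k < K → clearB (x + k * sx) (y + k * sy) seats = true) := by
    intro t ht hq
    obtain ⟨k, hk, m, hm, rfl⟩ := (mem_cellsOf seats t).mp ht
    simp only [bigPred, dirOf, Bool.and_eq_true, beq_iff_eq] at hq
    obtain ⟨⟨hc, hvis⟩, hdir⟩ := hq
    have hdx : dsign ((k:Int) - x) = sx := congrArg Prod.fst hdir
    have hdy : dsign ((m:Int) - y) = sy := congrArg Prod.snd hdir
    obtain ⟨hal1, hal2, hal3⟩ := (visibleB_iff x y (k:Int) (m:Int) seats).mp hvis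
    obtain ⟨hK1, hKx, hKy⟩ := align_decomp ((k:Int) - x) ((m:Int) - y) sx sy hal1 hal2 hdx hdy
    have hmW : m < pyWidth seats := by
      have := hrect _ (seats.getElem_mem hk); omega
    refine ⟨max |(k:Int) - x| |(m:Int) - y|, hK1, ?_, ?_, hc, ?_, ?_⟩
    · dsimp only; omega
    · dsimp only; omega
    · obtain ⟨hp, hq2, hcell⟩ := cellAt_eq seats hrect (k:Int) (m:Int)
        (by omega) (by omega) (by omega) (by omega)
      simp only [Int.toNat_natCast] at hcell
      simp only [hitHash, hcell, beq_iff_eq, Option.some.injEq]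
      simp [hc, hk, hmW]
    · intro k' h1 h2
      have := hal3 k' h1 (by omega)
      rwa [hdx, hdy] at this
  by_cases hray : rayA seats sx sy (seats.length + pyWidth seats + 1) (x + sx) (y + sy) = true
  · rw [if_pos hray]
    obtain ⟨n, hn, hpre, hhit⟩ :=
      (rayA_iff seats sx sy _ (x + sx) (y + sy) hrect).mp hray
    obtain ⟨hb1, hb2, hb3, hb4⟩ := bounds_of_hit _ _ _ hhit
    have hlook : (PySem.List.pyGet? seats (x + sx + (n:Int) * sx)).bind
        (fun r => PySem.List.pyGet? r (y + sy + (n:Int) * sy)) = some "#" := by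
      have h' := hhit
      simp only [hitHash, Bool.and_eq_true, beq_iff_eq] at h'
      exact h'.2
    obtain ⟨hp, hq2, hcell⟩ := cellAt_eq seats hrect _ _ hb1 hb2 hb3 hb4
    have hval : seats[(x + sx + (n:Int) * sx).toNat][(y + sy + (n:Int) * sy).toNat] = "#" := by
      rw [hcell] at hlook; exact Option.some.inj hlook
    obtain ⟨hds1, hds2, hmax, halign, hnz⟩ := align_comp ((n:Int)+1) sx sy (by omega) hsx hsy hne
    have hdxt : (x + sx + (n:Int) * sx) - x = ((n:Int)+1) * sx := by ring
    have hdyt : (y + sy + (n:Int) * sy) - y = ((n:Int)+1) * sy := by ring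
    have hq0 : (fun t => bigPred x y seats t && (dirOf x y t == (sx, sy)))
        (x + sx + (n:Int) * sx, y + sy + (n:Int) * sy, "#") = true := by
      simp only [bigPred, dirOf, Bool.and_eq_true, beq_iff_eq]
      refine ⟨⟨by simp, ?_⟩, ?_⟩
      · rw [visibleB_iff]
        rw [hdxt, hdyt]
        refine ⟨hnz, halign, ?_⟩
        intro k' hk1 hk2
        rw [hds1, hds2]
        rw [hmax] at hk2
        have hcl := hpre (k'.toNat - 1) (by omega)
        have e1 : x + sx + ((k'.toNat - 1 : Nat) : Int) * sx = x + k' * sx := by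
          have h : ((k'.toNat - 1 : Nat) : Int) = k' - 1 := by omega
          rw [h]; ring
        have e2 : y + sy + ((k'.toNat - 1 : Nat) : Int) * sy = y + k' * sy := by
          have h : ((k'.toNat - 1 : Nat) : Int) = k' - 1 := by omega
          rw [h]; ring
        rwa [e1, e2] at hcl
      · rw [hdxt, hdyt, hds1, hds2]
    apply countP_eq_one_of_unique _ _ _ (nodup_cellsOf seats) ?_ hq0
    · -- uniqueness
      intro b hb hqb
      obtain ⟨K, hK1, hbx, hby, hbval, hbhit, hbclear⟩ := hW b hb hqb
      have hKle : K ≤ (n:Int) + 1 := by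
        by_contra hgt
        have hcl := hbclear ((n:Int)+1) (by omega) (by omega)
        have e1 : x + ((n:Int)+1) * sx = x + sx + (n:Int) * sx := by ring
        have e2 : y + ((n:Int)+1) * sy = y + sy + (n:Int) * sy := by ring
        rw [e1, e2] at hcl
        exact clear_not_hit _ _ _ hcl hhit
      have hKge : (n:Int) + 1 ≤ K := by
        by_contra hlt
        have hcl := hpre (K.toNat - 1) (by omega)
        have e1 : x + sx + ((K.toNat - 1 : Nat) : Int) * sx = x + K * sx := by
          have h : ((K.toNat - 1 : Nat) : Int) = K - 1 := by omega
          rw [h]; ring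
        have e2 : y + sy + ((K.toNat - 1 : Nat) : Int) * sy = y + K * sy := by
          have h : ((K.toNat - 1 : Nat) : Int) = K - 1 := by omega
          rw [h]; ring
        rw [e1, e2, ← hbx, ← hby] at hcl
        exact clear_not_hit _ _ _ hcl hbhit
      have hKeq : K = (n:Int) + 1 := le_antisymm hKle hKge
      have hb' : b = (b.1, b.2.1, b.2.2) := rfl
      rw [hb', hbx, hby, hbval, hKeq]
      refine Prod.ext (by simp; ring) (Prod.ext (by simp; ring) rfl)
    · -- membership of the hit cell
      rw [mem_cellsOf]
      have hpN : (x + sx + (n:Int) * sx).toNat < seats.length := by omega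
      refine ⟨(x + sx + (n:Int) * sx).toNat, hpN, (y + sy + (n:Int) * sy).toNat, ?_, ?_⟩
      · have := hrect _ (seats.getElem_mem hpN)
        omega
      · rw [hval]
        simp [Int.toNat_of_nonneg hb1, Int.toNat_of_nonneg hb3]
  · rw [if_neg hray]
    rw [List.countP_eq_zero]
    intro t ht hq
    apply hray
    obtain ⟨K, hK1, hbx, hby, hbval, hbhit, hbclear⟩ := hW t ht hq
    rw [hbx, hby] at hbhit
    obtain ⟨hc1, hc2, hc3, hc4⟩ := bounds_of_hit _ _ _ hbhit
    have hstep1 : 0 ≤ x + sx ∧ x + sx < (seats.length : Int) ∧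
        0 ≤ y + sy ∧ y + sy < (pyWidth seats : Int) := by
      by_cases hK : K = 1
      · rw [hK] at hc1 hc2 hc3 hc4
        simp only [one_mul] at hc1 hc2 hc3 hc4
        exact ⟨hc1, hc2, hc3, hc4⟩
      · have hcl := hbclear 1 (by omega) (by omega)
        have := bounds_of_clear _ _ _ hcl
        simpa using this
    have hKb : K ≤ (seats.length : Int) + (pyWidth seats : Int) :=
      steps_bound (seats.length : Int) (pyWidth seats : Int) sx sy x y hsx hsy hne K hK1
        ⟨hstep1.1, hstep1.2.1, hstep1.2.2.1, hstep1.2.2.2⟩ ⟨hc1, hc2, hc3, hc4⟩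
    rw [rayA_iff seats sx sy _ (x + sx) (y + sy) hrect]
    refine ⟨K.toNat - 1, by omega, ?_, ?_⟩
    · intro m hm
      have hcl := hbclear ((m:Int) + 1) (by omega) (by omega)
      have e1 : x + sx + (m:Int) * sx = x + ((m:Int)+1) * sx := by ring
      have e2 : y + sy + (m:Int) * sy = y + ((m:Int)+1) * sy := by ring
      rw [e1, e2]; exact hcl
    · have e1 : x + sx + ((K.toNat - 1 : Nat) : Int) * sx = x + K * sx := by
        have h : ((K.toNat - 1 : Nat) : Int) = K - 1 := by omega
        rw [h]; ring
      have e2 : y + sy + ((K.toNat - 1 : Nat) : Int) * sy = y + K * sy := by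
        have h : ((K.toNat - 1 : Nat) : Int) = K - 1 := by omega
        rw [h]; ring
      rw [e1, e2]; exact hbhit

theorem countP_flatMap_sum {α β : Type} (l : List α) (g : α → List β) (P : β → Bool) :
    (l.flatMap g).countP P = (l.map (fun a => (g a).countP P)).sum := by
  induction l with
  | nil => simp
  | cons a l ih => simp [List.countP_append, ih]

theorem dsign_cases (n : Int) :
    (n < 0 ∧ dsign n = -1) ∨ (n = 0 ∧ dsign n = 0) ∨ (0 < n ∧ dsign n = 1) := by
  unfold dsign; split_ifs <;> omega

theorem dirOf_mem_D8 (x y : Int) (seats : List (List String)) (t : Int × Int × String)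
    (h : bigPred x y seats t = true) : dirOf x y t ∈ D8 := by
  have hvis : visibleB x y t.1 t.2.1 seats = true := by
    simp only [bigPred, Bool.and_eq_true] at h; exact h.2
  obtain ⟨hal1, -, -⟩ := (visibleB_iff x y t.1 t.2.1 seats).mp hvis
  rcases dsign_cases (t.1 - x) with ⟨h1, e1⟩ | ⟨h1, e1⟩ | ⟨h1, e1⟩ <;>
    rcases dsign_cases (t.2.1 - y) with ⟨h2, e2⟩ | ⟨h2, e2⟩ | ⟨h2, e2⟩ <;>
    simp [dirOf, e1, e2, D8] <;> exact absurd ⟨h1, h2⟩ hal1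

-- B's double counting loop equals the direction-indexed ray count
theorem cntB_eq (x y : Int) (seats : List (List String))
    (hrect : ∀ row ∈ seats, row.length = pyWidth seats) :
    ((PySem.List.enumerate seats).foldl (fun cnt p =>
        (PySem.List.enumerate p.2).foldl (fun cnt q =>
          if q.2 == "#" && visibleB x y p.1 q.1 seats then cnt + 1 else cnt) cnt) (0:Int))
      = ((D8.map (fun d =>
          if rayA seats d.1 d.2 (seats.length + pyWidth seats + 1) (x + d.1) (y + d.2)
          then (1:Nat) else 0)).sum : Int) := by
  simp only [PySem.List.foldl_if_add_one]
  rw [PySem.List.foldl_add, zero_add]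
  have h1 : ((PySem.List.enumerate seats).map (fun p =>
        (PySem.List.enumerate p.2).countP (fun q => q.2 == "#" && visibleB x y p.1 q.1 seats))).sum
      = (cellsOf seats).countP (bigPred x y seats) := by
    rw [cellsOf, countP_flatMap_sum]
    apply congrArg
    apply List.map_congr_left
    intro p hp
    rw [List.countP_map]
    apply List.countP_congr
    intro q hq
    rfl
  have e : ((PySem.List.enumerate seats).map (fun p =>
        (((PySem.List.enumerate p.2).countP (fun q => q.2 == "#" && visibleB x y p.1 q.1 seats) : Nat) : Int))).sum
      = (((PySem.List.enumerate seats).map (fun p =>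
        (PySem.List.enumerate p.2).countP (fun q => q.2 == "#" && visibleB x y p.1 q.1 seats))).sum : Int) := by
    rw [Nat.cast_list_sum, List.map_map]
    rfl
  rw [e, h1]
  rw [countP_partition (cellsOf seats) _ (dirOf x y) (fun t ht hp => dirOf_mem_D8 x y seats t hp)]
  simp only [D8, List.map_cons, List.map_nil, List.sum_cons, List.sum_nil]
  rw [dir_count x y seats hrect (-1) (-1) (by decide) (by decide) (by decide),
     dir_count x y seats hrect (-1) 0 (by decide) (by decide) (by decide),
     dir_count x y seats hrect (-1) 1 (by decide) (by decide) (by decide),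
     dir_count x y seats hrect 0 (-1) (by decide) (by decide) (by decide),
     dir_count x y seats hrect 0 1 (by decide) (by decide) (by decide),
     dir_count x y seats hrect 1 (-1) (by decide) (by decide) (by decide),
     dir_count x y seats hrect 1 0 (by decide) (by decide) (by decide),
     dir_count x y seats hrect 1 1 (by decide) (by decide) (by decide)]

theorem neg_one_ne (x : Int) : ((x + -1 == x) = false) := by simp
theorem one_ne (x : Int) : ((x + 1 == x) = false) := by simp
theorem zero_eq (x : Int) : ((x + 0 == x) = true) := by simp

theorem pyRange_m1_2 : PySem.List.pyRange (-1) 2 1 = [-1, 0, 1] := by decide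

-- A fold whose step keeps "L" and otherwise flips to "L" exactly when the test fires
-- (the Lean shape of A's `break`-ing for-loops).
theorem break_fold {α : Type} (f : String → α → String) (A : α → Bool)
    (hfL : ∀ e, f "L" e = "L")
    (hf : ∀ st e, st ≠ "L" → f st e = if A e then "L" else st) :
    ∀ (l : List α) (s : String),
      l.foldl f s = if s == "L" then "L" else if l.any A then "L" else s := by
  intro l
  induction l with
  | nil => intro s; by_cases hs : s = "L" <;> simp [hs]
  | cons e l ih =>
    intro s
    by_cases hs : s = "L"
    · subst hs; simp [List.foldl, hfL, ih]
    · simp only [List.foldl, hf s e hs]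
      cases hA : A e
      · simp [ih, hs, hA]
      · simp [ih, hA]

-- A's counting inner loop is `cnt + (number of directions whose ray hits "#")`.
theorem inner_count (x y : Int) (seats : List (List String)) (F : Nat) (i : Int) (c : Int) :
    (PySem.List.pyRange (-1) 2 1).foldl (fun cnt j =>
        if x + i == x && y + j == y then cnt
        else if rayA seats i j F (x + i) (y + j) then cnt + 1 else cnt) c =
    c + (((PySem.List.pyRange (-1) 2 1).countP fun j =>
        !(x + i == x && y + j == y) && rayA seats i j F (x + i) (y + j)) : Int) := by
  rw [show (fun (cnt : Int) (j : Int) =>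
        if x + i == x && y + j == y then cnt
        else if rayA seats i j F (x + i) (y + j) then cnt + 1 else cnt) =
      (fun (cnt : Int) (j : Int) =>
        if (!(x + i == x && y + j == y) && rayA seats i j F (x + i) (y + j)) then cnt + 1
        else cnt) from by
    funext cnt j
    cases hq : (x + i == x && y + j == y) <;>
      cases hr : rayA seats i j F (x + i) (y + j) <;> simp [hq, hr]]
  rw [PySem.List.foldl_if_add_one]


-- the two final boolean identities (8 ray tests abstracted), checked by `decide`
theorem ifL_eq : ∀ (b1 b2 b3 b4 b5 b6 b7 b8 : Bool),
    (if (("#" : String) == "L") = true then "L"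
     else if (b1 || (b2 || b3) || (b4 || b5 || (b6 || (b7 || b8)))) = true then "L" else "#")
    = (if (((((if b1 = true then (1:Nat) else 0) +
          ((if b2 = true then 1 else 0) +
            ((if b3 = true then 1 else 0) +
              ((if b4 = true then 1 else 0) +
                ((if b5 = true then 1 else 0) +
                  ((if b6 = true then 1 else 0) +
                    ((if b7 = true then 1 else 0) +
                      ((if b8 = true then 1 else 0) + 0)))))))) : Nat) : Int) > 0) then "L" else "#") := by
  decide

theorem ifH_eq : ∀ (b1 b2 b3 b4 b5 b6 b7 b8 : Bool),
    (if ((0:Int) +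
        ↑((((0:Nat) + if b3 = true then 1 else 0) + if b2 = true then 1 else 0) + if b1 = true then 1 else 0) +
        ↑((((0:Nat) + if b5 = true then 1 else 0) + if false = true then 1 else 0) + if b4 = true then 1 else 0) +
        ↑((((0:Nat) + if b8 = true then 1 else 0) + if b7 = true then 1 else 0) + if b6 = true then 1 else 0) > 4)
     then "L" else "#")
    = (if (((((if b1 = true then (1:Nat) else 0) +
          ((if b2 = true then 1 else 0) +
            ((if b3 = true then 1 else 0) +
              ((if b4 = true then 1 else 0) +
                ((if b5 = true then 1 else 0) +
                  ((if b6 = true then 1 else 0) +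
                    ((if b7 = true then 1 else 0) +
                      ((if b8 = true then 1 else 0) + 0)))))))) : Nat) : Int) > 4) then "L" else "#") := by
  decide

-- ===== VERDICT (by name: the statement is the Claim_ definition above) =====
set_option maxHeartbeats 3200000 in
theorem calc_next2_spec : Claim_equal_calc_next2 := by
  intro x y seats _ hpre
  obtain ⟨hnn, hrectH⟩ := hpre
  unfold Spec_calc_next2 calc_next2 calc_next2_alt
  cases h : (PySem.List.pyGet? seats x).bind (fun r => PySem.List.pyGet? r y) with
  | none => rfl
  | some cell =>
    simp only []
    by_cases hL : cell = "L"
    · subst hL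
      have hrect := hrectH (Or.inl h)
      simp only [show (("L" : String) == "L") = true from rfl,
        show (("L" : String) != "L") = false from rfl, Bool.false_and,
        Bool.false_eq_true, if_true, if_false]
      rw [break_fold _
            (fun i => (PySem.List.pyRange (-1) 2 1).any fun j =>
              !(x + i == x && y + j == y) &&
                rayA seats i j (seats.length + pyWidth seats + 1) (x + i) (y + j))
            (fun e => by simp)
            (fun st i hst => by
              simp only [if_neg (by simp [hst] : ¬ ((st == "L") = true))]
              rw [break_fold _
                    (fun j => !(x + i == x && y + j == y) &&
                      rayA seats i j (seats.length + pyWidth seats + 1) (x + i) (y + j))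
                    (fun e => by simp)
                    (fun st j hst => by
                      cases hq : (x + i == x && y + j == y) <;>
                        cases hr : rayA seats i j (seats.length + pyWidth seats + 1)
                            (x + i) (y + j) <;> simp [hst, hq, hr])]
              simp [hst])]
      rw [cntB_eq x y seats hrect]
      rw [pyRange_m1_2]
      simp only [List.any_cons, List.any_nil, D8, List.map_cons, List.map_nil,
        List.sum_cons, List.sum_nil,
        neg_one_ne, one_ne, zero_eq, Bool.and_true, Bool.and_false,
        Bool.not_true, Bool.not_false, Bool.false_and, Bool.true_and, Bool.or_false,
        Bool.false_or]
      exact ifL_eq _ _ _ _ _ _ _ _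
    · by_cases hH : cell = "#"
      · subst hH
        have hrect := hrectH (Or.inr h)
        simp only [show (("#" : String) == "L") = false from rfl,
          show (("#" : String) == "#") = true from rfl,
          show (("#" : String) != "L") = true from rfl,
          show (("#" : String) != "#") = false from rfl,
          Bool.and_false,
          Bool.false_eq_true, if_true, if_false]
        simp only [inner_count]
        rw [cntB_eq x y seats hrect]
        rw [pyRange_m1_2]
        simp only [List.foldl, D8, List.map_cons, List.map_nil, List.sum_cons, List.sum_nil,
          List.countP_cons, List.countP_nil, neg_one_ne, one_ne, zero_eq,
          Bool.not_true, Bool.not_false, Bool.false_and, Bool.true_and]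
        exact ifH_eq _ _ _ _ _ _ _ _
      · have h1 : (cell == "L") = false := by simp [hL]
        have h2 : (cell == "#") = false := by simp [hH]
        simp only [h1, h2, bne, Bool.not_false, Bool.and_self, Bool.false_eq_true,
          if_true, if_false]
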